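-- pv_equiv track=rewrite | github.com/tkgaolol/brushcode_juejin | 22.py | solution
-- ===== SOURCE A (Python) =====
-- def solution(S: str) -> int:
--     # 统计每个字符的出现次数
--     char_count = {}
--     for c in S:
--         char_count[c] = char_count.get(c, 0) + 1
--
--     # 计算需要的操作次数
--     operations = 0
--     total_pairs = 0
--
--     # 统计有多少对重复字符需要处理
--     for count in char_count.values():
--         # 对于每个字符，计算可以形成多少对
--         pairs = count // 2
--         total_pairs += pairs
--
--     # 每次操作处理一对重复字符，并添加一个新字符
--     # 如果新添加的字符造成了新的重复，那么在下一轮中会继续处理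
--     return total_pairs
-- ===== SOURCE B (Python) =====
-- def solution(S: str) -> int:
--     # sort, then scan runs of equal characters; each run of length k yields k // 2 pairs
--     s = sorted(S)
--     total = 0
--     while s:
--         c = s[0]
--         k = 1
--         while k < len(s) and s[k] == c:
--             k += 1
--         total += k // 2
--         s = s[k:]
--     return total
-- ===== Notes on version B (the rewrite author's own statement) =====
-- stated objective: alternative
-- what changed: Replaces the frequency-dictionary pass plus a sum over its values by a sort-then-scan over runs of equal characters, keeping a single accumulator and no dictionary.
import Mathlib
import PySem

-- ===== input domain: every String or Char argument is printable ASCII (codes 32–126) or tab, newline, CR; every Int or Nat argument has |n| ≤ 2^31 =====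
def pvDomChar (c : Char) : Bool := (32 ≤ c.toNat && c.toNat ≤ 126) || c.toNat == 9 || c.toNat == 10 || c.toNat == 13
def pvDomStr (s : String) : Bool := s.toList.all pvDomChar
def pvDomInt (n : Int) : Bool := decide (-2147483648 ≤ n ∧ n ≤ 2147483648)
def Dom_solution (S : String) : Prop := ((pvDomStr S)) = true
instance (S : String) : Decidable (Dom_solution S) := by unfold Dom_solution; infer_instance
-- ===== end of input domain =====

-- B replaces A's frequency dictionary by a sort-then-scan over runs of equal characters (alternative algorithm, return value only).

-- ===== PORT A =====
-- A builds a character-count dict, then sums count // 2 over its values (A's unused 'operations' variable is dead code and omitted).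
def solution (S : String) : Int :=
  let charCount := S.toList.foldl (fun d c => d.insert c (d.getD c 0 + 1)) PySem.Dict.empty
  charCount.values.foldl (fun totalPairs count => totalPairs + PySem.Int.floordiv count 2) 0

-- ===== PORT B =====
-- run scan over the sorted characters: each maximal run of length k contributes k // 2
def runScan : List Char → Int
  | [] => 0
  | c :: rest =>
    PySem.Int.floordiv (1 + (rest.takeWhile (fun x => x == c)).length) 2
      + runScan (rest.dropWhile (fun x => x == c))
termination_by s => s.length
decreasing_by
  simpa using Nat.lt_succ_of_le (List.Sublist.length_le (List.dropWhile_sublist _))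

def solution_alt (S : String) : Int :=
  runScan (PySem.List.sorted S.toList (fun x => x) false)

-- ===== PRECONDITION & SPEC =====
def Spec_solution (S : String) (out : Int) : Prop := out = solution_alt S
instance (S : String) (out : Int) : Decidable (Spec_solution S out) := by unfold Spec_solution; infer_instance

-- ===== CLAIM (what is proved, stated in full; the proofs are below) =====
def Claim_equal_solution : Prop := ∀ (S : String), Dom_solution S → Spec_solution S (solution S)

-- ===== LEMMAS AND PROOFS =====

-- pairs contributed by the characters in ks, counted in l
def sumPairs (ks l : List Char) : Int :=
  (ks.map (fun c => PySem.Int.floordiv (l.count c : Int) 2)).sum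

theorem foldl_add_fd (xs : List Int) (a : Int) :
    xs.foldl (fun acc v => acc + PySem.Int.floordiv v 2) a
      = a + (xs.map (fun v => PySem.Int.floordiv v 2)).sum := by
  induction xs generalizing a with
  | nil => simp
  | cons x xs ih => rw [List.foldl_cons, ih]; rw [List.map_cons, List.sum_cons]; ring

theorem sumPairs_congr (ks ks' l : List Char) (h1 : ks.Nodup) (h2 : ks'.Nodup)
    (h : ∀ x, x ∈ ks ↔ x ∈ ks') : sumPairs ks l = sumPairs ks' l := by
  have hp : ks.Perm ks' := (List.perm_ext_iff_of_nodup h1 h2).2 h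
  exact List.Perm.sum_eq (hp.map _)

theorem sumPairs_count_congr (ks l l' : List Char)
    (h : ∀ x ∈ ks, l.count x = l'.count x) : sumPairs ks l = sumPairs ks l' := by
  unfold sumPairs
  congr 1
  exact List.map_congr_left (fun x hx => by rw [h x hx])

theorem solution_eq_sumPairs (S : String) :
    solution S = sumPairs (PySem.Set.ofList S.toList) S.toList := by
  unfold solution
  rw [PySem.Dict.foldl_insert_getD_add_one_eq_counter, foldl_add_fd]
  simp [sumPairs, PySem.Dict.values, PySem.Dict.items_counter, List.map_map,
    Function.comp_def]

theorem not_mem_dropWhile_sorted (c : Char) (rest : List Char)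
    (hle : ∀ x ∈ rest, c ≤ x) (hp : rest.Pairwise (· ≤ ·)) :
    c ∉ rest.dropWhile (fun x => x == c) := by
  induction rest with
  | nil => simp
  | cons d rest' ih =>
    by_cases hdc : (d == c) = true
    · simp only [List.dropWhile_cons, hdc, if_true]
      exact ih (fun x hx => hle x (List.mem_cons_of_mem d hx)) (List.pairwise_cons.1 hp).2
    · simp only [List.dropWhile_cons, hdc]
      intro hc
      have hdc' : d ≠ c := by simpa using hdc
      rcases List.mem_cons.1 hc with h | h
      · exact hdc' h.symm
      · have h1 : c ≤ d := hle d (by simp)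
        have h2 : d ≤ c := (List.pairwise_cons.1 hp).1 c h
        exact hdc' (le_antisymm h2 h1)

theorem runScan_eq_sumPairs : ∀ (n : ℕ) (s : List Char), s.length ≤ n →
    s.Pairwise (· ≤ ·) →
    ∃ ks : List Char, ks.Nodup ∧ (∀ x, x ∈ ks ↔ x ∈ s) ∧ runScan s = sumPairs ks s := by
  intro n
  induction n with
  | zero =>
    intro s hs _
    have : s = [] := List.eq_nil_of_length_eq_zero (Nat.le_zero.1 hs)
    subst this
    exact ⟨[], by simp, by simp, by simp [runScan, sumPairs]⟩
  | succ n ih =>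
    intro s hs hp
    match s with
    | [] => exact ⟨[], by simp, by simp, by simp [runScan, sumPairs]⟩
    | c :: rest =>
      set run := rest.takeWhile (fun x => x == c) with hrun
      set t := rest.dropWhile (fun x => x == c) with ht
      have hsplit : run ++ t = rest := List.takeWhile_append_dropWhile
      have hrunmem : ∀ x ∈ run, x = c := by
        intro x hx
        have := List.mem_takeWhile_imp hx
        simpa using this
      have hcnott : c ∉ t := by
        rw [ht]
        exact not_mem_dropWhile_sorted c rest (List.pairwise_cons.1 hp).1
          (List.pairwise_cons.1 hp).2
      have hlen : t.length ≤ n := by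
        have h1 : t.length ≤ rest.length := (List.dropWhile_sublist _).length_le
        have h2 : rest.length ≤ n := by
          have : rest.length + 1 ≤ n + 1 := by simpa using hs
          omega
        omega
      have hpt : t.Pairwise (· ≤ ·) :=
        (List.pairwise_cons.1 hp).2.sublist (List.dropWhile_sublist _)
      obtain ⟨ks, hnd, hmem, heq⟩ := ih t hlen hpt
      refine ⟨c :: ks, ?_, ?_, ?_⟩
      · exact List.nodup_cons.2 ⟨fun h => hcnott ((hmem c).1 h), hnd⟩
      · intro x
        constructor
        · intro hx
          rcases List.mem_cons.1 hx with h | h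
          · subst h; simp
          · have : x ∈ t := (hmem x).1 h
            rw [← hsplit] at *
            simp [this]
        · intro hx
          rcases List.mem_cons.1 hx with h | h
          · subst h; simp
          · rw [← hsplit] at h
            rcases List.mem_append.1 h with h | h
            · simp [hrunmem x h]
            · simp [List.mem_cons, (hmem x).2 h]
      · -- count c s = 1 + run.length ; count x s = count x t for x ∈ ks
        have hcount_c : (c :: rest).count c = 1 + run.length := by
          rw [← hsplit]
          have hcrun : run.count c = run.length :=
            List.count_eq_length.2 (fun x hx => (hrunmem x hx).symm)
          have hct : t.count c = 0 := List.count_eq_zero.2 hcnott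
          simp [List.count_append, hcrun, hct]
          omega
        have hcount_x : ∀ x ∈ ks, (c :: rest).count x = t.count x := by
          intro x hx
          have hxt : x ∈ t := (hmem x).1 hx
          have hxc : x ≠ c := fun h => hcnott (h ▸ hxt)
          have hxrun : run.count x = 0 :=
            List.count_eq_zero.2 (fun h => hxc (hrunmem x h))
          rw [← hsplit]
          simp [List.count_append, hxrun, Ne.symm hxc]
        show runScan (c :: rest) = sumPairs (c :: ks) (c :: rest)
        rw [runScan]
        have h1 : sumPairs ks t = sumPairs ks (c :: rest) :=
          (sumPairs_count_congr ks (c :: rest) t hcount_x).symm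
        rw [heq, h1]
        unfold sumPairs
        rw [List.map_cons, List.sum_cons, hcount_c]
        rw [← hrun]
        push_cast
        ring

theorem solution_alt_eq (S : String) :
    ∃ ks : List Char, ks.Nodup ∧ (∀ x, x ∈ ks ↔ x ∈ S.toList) ∧
      solution_alt S = sumPairs ks S.toList := by
  unfold solution_alt
  set s := PySem.List.sorted S.toList (fun x => x) false with hsdef
  have hperm : s.Perm S.toList := PySem.List.sorted_perm S.toList (fun x => x) false
  have hpair : s.Pairwise (· ≤ ·) := by
    simpa using PySem.List.sorted_pairwise (xs := S.toList) (key := fun x => x)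
  obtain ⟨ks, hnd, hmem, heq⟩ := runScan_eq_sumPairs s.length s le_rfl hpair
  refine ⟨ks, hnd, ?_, ?_⟩
  · intro x; rw [hmem x]; exact hperm.mem_iff
  · rw [heq]
    exact sumPairs_count_congr ks s S.toList (fun x _ => hperm.count_eq x)

-- ===== VERDICT (by name: the statement is the Claim_ definition above) =====
theorem solution_spec : Claim_equal_solution := by
  intro S _
  unfold Spec_solution
  obtain ⟨ks, hnd, hmem, heq⟩ := solution_alt_eq S
  rw [heq, solution_eq_sumPairs]
  apply sumPairs_congr _ _ _ (by simpa using PySem.Set.nodup_ofList S.toList) hnd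
  intro x
  rw [hmem x]
  simpa using (PySem.Set.mem_ofList (l := S.toList) (x := x))
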